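-- pv_equiv track=rewrite | github.com/philippetoso-commits/projet_perso | app_lecture/scripts/appliquer_moulinette_v4.py | nettoyer_decoupage
-- ===== SOURCE A (Python) =====
-- GRAPHÈMES_COMPLEXES = [
--     "eau", "au", "ai", "oi", "ou",
--     "an", "en", "on", "in", "un",
--     "ch", "gn", "qu"
-- ]
--
-- GROUPES_CONSONANTIQUES = [
--     "tr", "pr", "br", "dr", "cr", "fr",
--     "pl", "bl", "gl", "cl"
-- ]
--
-- VOYELLES = "aeiouyàâäéèêëîïôöùûüÿœ"
--
-- APPLIQUER_GROUPES_CONSONANTIQUES = False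
--
-- def contient_voyelle(s):
--     return any(c in VOYELLES for c in s.lower())
--
-- def corriger_graphèmes(mot, syllabes):
--     """
--     Fusionne UNIQUEMENT si un graphème complexe est coupé à la frontière
--     (ex. "a"+"u" → "au"). Ne fusionne PAS si le graphème est déjà entier
--     dans une syllabe (ex. garder "gât-eau" car "eau" est entier dans la 2e).
--     """
--     i = 0
--     while i < len(syllabes) - 1:
--         s1, s2 = syllabes[i], syllabes[i + 1]
--         merged = False
--         for g in GRAPHÈMES_COMPLEXES:
--             # Le graphème g est coupé à la frontière ssi pour un j dans 1..len(g)-1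
--             # s1 se termine par g[:j] et s2 commence par g[j:]
--             for j in range(1, len(g)):
--                 if s1.endswith(g[:j]) and s2.startswith(g[j:]):
--                     syllabes[i] = s1 + s2
--                     del syllabes[i + 1]
--                     merged = True
--                     i -= 1
--                     break
--             if merged:
--                 break
--         i += 1
--
--     return syllabes
--
-- def corriger_consonne_isolée(syllabes):
--     """
--     Supprime les syllabes composées uniquement d'une consonne.
--     """
--     i = 0
--     while i < len(syllabes):
--         if not contient_voyelle(syllabes[i]):
--             if i > 0:
--                 syllabes[i - 1] += syllabes[i]
--                 del syllabes[i]
--                 continue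
--             elif i < len(syllabes) - 1:
--                 syllabes[i + 1] = syllabes[i] + syllabes[i + 1]
--                 del syllabes[i]
--                 continue
--         i += 1
--     return syllabes
--
-- def corriger_groupes_consonantiques(syllabes):
--     """
--     Évite de couper un groupe naturel (tr, pl, fr…)
--     """
--     i = 0
--     while i < len(syllabes) - 1:
--         fin = syllabes[i][-1] if syllabes[i] else ""
--         debut = syllabes[i + 1][:1]
--
--         cluster = fin + debut
--         if cluster in GROUPES_CONSONANTIQUES:
--             syllabes[i] += debut
--             syllabes[i + 1] = syllabes[i + 1][1:]
--             if syllabes[i + 1] == "":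
--                 del syllabes[i + 1]
--                 continue
--         i += 1
--
--     return syllabes
--
-- def nettoyer_decoupage(mot, decoupage):
--     syllabes = decoupage.split("-")
--
--     syllabes = corriger_consonne_isolée(syllabes)
--     syllabes = corriger_graphèmes(mot, syllabes)
--     if APPLIQUER_GROUPES_CONSONANTIQUES:
--         syllabes = corriger_groupes_consonantiques(syllabes)
--
--     # Nettoyage final
--     syllabes = [s for s in syllabes if s.strip() != ""]
--
--     return "-".join(syllabes)
-- ===== SOURCE B (Python) =====
-- GRAPHÈMES_COMPLEXES = [
--     "eau", "au", "ai", "oi", "ou",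
--     "an", "en", "on", "in", "un",
--     "ch", "gn", "qu"
-- ]
--
-- VOYELLES = "aeiouyàâäéèêëîïôöùûüÿœ"
--
--
-- def contient_voyelle(s):
--     return any(c in VOYELLES for c in s.lower())
--
--
-- def coupe_frontière(s1, s2):
--     """Un graphème complexe est coupé à la frontière s1|s2."""
--     return any(s1.endswith(g[:j]) and s2.startswith(g[j:])
--                for g in GRAPHÈMES_COMPLEXES
--                for j in range(1, len(g)))
--
--
-- def fusionner_consonnes(syllabes):
--     """Forward pass: a syllable without vowel is folded into the previously
--     emitted syllable, or accumulated as a pending prefix while none exists."""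
--     acc = []
--     pending = ""
--     for s in syllabes:
--         if contient_voyelle(s):
--             acc.append(pending + s)
--             pending = ""
--         elif acc:
--             acc[-1] += s
--         else:
--             pending += s
--     return acc if acc else [pending]
--
--
-- def fusionner_graphèmes(syllabes):
--     """Forward pass holding the current syllable: keep absorbing the next
--     syllable while a complex grapheme straddles their boundary."""
--     if not syllabes:
--         return []
--     acc = []
--     cur = syllabes[0]
--     for s in syllabes[1:]:
--         if coupe_frontière(cur, s):
--             cur += s
--         else:
--             acc.append(cur)
--             cur = s
--     acc.append(cur)
--     return acc
--
--
-- def nettoyer_decoupage(mot, decoupage):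
--     syllabes = fusionner_graphèmes(fusionner_consonnes(decoupage.split("-")))
--     return "-".join(s for s in syllabes if s.strip() != "")
-- ===== Notes on version B (the rewrite author's own statement) =====
-- stated objective: alternative
-- what changed: Each in-place while-loop with index backtracking and del (consonant-merge pass and split-grapheme merge pass) is replaced by a single forward accumulating fold: the consonant pass folds vowel-less syllables into the last emitted syllable (or a pending prefix), and the grapheme pass holds the current syllable and keeps absorbing the next one while a complex grapheme straddles the boundary.
import Mathlib
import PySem

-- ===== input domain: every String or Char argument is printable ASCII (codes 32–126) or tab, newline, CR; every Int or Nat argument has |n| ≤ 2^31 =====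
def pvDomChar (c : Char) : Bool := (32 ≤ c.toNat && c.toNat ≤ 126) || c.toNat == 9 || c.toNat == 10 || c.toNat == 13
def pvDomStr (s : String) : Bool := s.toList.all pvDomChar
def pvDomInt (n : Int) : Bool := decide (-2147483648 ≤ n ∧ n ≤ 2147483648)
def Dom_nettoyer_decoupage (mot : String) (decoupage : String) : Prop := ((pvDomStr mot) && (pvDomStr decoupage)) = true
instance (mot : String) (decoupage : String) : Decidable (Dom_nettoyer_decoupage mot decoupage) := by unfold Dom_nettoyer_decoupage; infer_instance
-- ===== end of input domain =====

-- B keeps A's three-stage pipeline but replaces each in-place index-backtracking while/del loop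
-- by a single forward accumulating pass (objective: alternative decomposition, same cost).

-- ===== PORT A =====
-- A works on the syllable list from decoupage.split("-"); syllables are ported as List Char.
def pvVoyellesA : List Char := "aeiouyàâäéèêëîïôöùûüÿœ".toList

def pvGraphemesA : List (List Char) :=
  ["eau".toList, "au".toList, "ai".toList, "oi".toList, "ou".toList,
   "an".toList, "en".toList, "on".toList, "in".toList, "un".toList,
   "ch".toList, "gn".toList, "qu".toList]

-- contient_voyelle(s): any(c in VOYELLES for c in s.lower())
def pvContientVoyelleA (s : List Char) : Bool :=
  (PySem.Chars.lower s).any (fun c => pvVoyellesA.contains c)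

-- the inner double loop of corriger_graphèmes (its only effect is whether a merge fires)
def pvMergeFoundA (s1 s2 : List Char) : Bool :=
  pvGraphemesA.any (fun g =>
    (PySem.List.pyRange 1 (g.length : Int) 1).any (fun j =>
      PySem.Chars.endswith s1 (PySem.List.slice g none (some j)) &&
      PySem.Chars.startswith s2 (PySem.List.slice g (some j) none)))

-- the while-loop of corriger_consonne_isolée (in-place merge/del with index i);
-- fuel only makes the recursion structural: 2*len+1 steps always suffice (proved below)
def pvCorrConsA (syll : List (List Char)) (i : Nat) : Nat → List (List Char)
  | 0 => syll
  | fuel + 1 =>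
    if h : i < syll.length then
      if !pvContientVoyelleA syll[i] then
        if hp : 0 < i then
          pvCorrConsA ((syll.set (i-1) (syll[i-1] ++ syll[i])).eraseIdx i) i fuel
        else if i < syll.length - 1 then
          pvCorrConsA ((syll.set (i+1) (syll[i] ++ syll[i+1]!)).eraseIdx i) i fuel
        else pvCorrConsA syll (i+1) fuel
      else pvCorrConsA syll (i+1) fuel
    else syll

-- the while-loop of corriger_graphèmes (same fuel guard)
def pvCorrGraA (syll : List (List Char)) (i : Nat) : Nat → List (List Char)
  | 0 => syll
  | fuel + 1 =>
    if h : i + 1 < syll.length then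
      if pvMergeFoundA syll[i] syll[i+1] then
        -- syllabes[i] = s1 + s2; del syllabes[i+1]; i -= 1 … i += 1  (net: i unchanged)
        pvCorrGraA ((syll.set i (syll[i] ++ syll[i+1])).eraseIdx (i+1)) i fuel
      else pvCorrGraA syll (i+1) fuel
    else syll

-- the two passes, started at i = 0 with enough fuel for the loop to run to its end
def pvCorrConsA2 (syll : List (List Char)) : List (List Char) :=
  pvCorrConsA syll 0 (2 * syll.length + 1)

def pvCorrGraA2 (syll : List (List Char)) : List (List Char) :=
  pvCorrGraA syll 0 (2 * syll.length + 1)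

-- APPLIQUER_GROUPES_CONSONANTIQUES is False: that pass is skipped
def nettoyer_decoupage (mot : String) (decoupage : String) : String :=
  String.ofList (PySem.Chars.join "-".toList
    (List.filter (fun s => !(PySem.Chars.strip s).isEmpty)
      (pvCorrGraA2 (pvCorrConsA2 (PySem.Chars.splitOn decoupage.toList "-".toList)))))

-- ===== PORT B =====
def pvVoyellesB : List Char := "aeiouyàâäéèêëîïôöùûüÿœ".toList

def pvGraphemesB : List (List Char) :=
  ["eau".toList, "au".toList, "ai".toList, "oi".toList, "ou".toList,
   "an".toList, "en".toList, "on".toList, "in".toList, "un".toList,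
   "ch".toList, "gn".toList, "qu".toList]

def pvContientVoyelleB (s : List Char) : Bool :=
  (PySem.Chars.lower s).any (fun c => pvVoyellesB.contains c)

-- coupe_frontière(s1, s2)
def pvCoupeFrontB (s1 s2 : List Char) : Bool :=
  pvGraphemesB.any (fun g =>
    (PySem.List.pyRange 1 (g.length : Int) 1).any (fun j =>
      PySem.Chars.endswith s1 (PySem.List.slice g none (some j)) &&
      PySem.Chars.startswith s2 (PySem.List.slice g (some j) none)))

-- fusionner_consonnes: forward fold; racc is the emitted list in reverse (append = cons)
def pvFusConsGoB (pending : List Char) (racc : List (List Char)) (rest : List (List Char)) :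
    List (List Char) :=
  match rest with
  | [] => match racc with
          | [] => [pending]
          | _ :: _ => racc.reverse
  | s :: rs =>
      if pvContientVoyelleB s then pvFusConsGoB [] ((pending ++ s) :: racc) rs
      else match racc with
           | [] => pvFusConsGoB (pending ++ s) [] rs
           | a :: t => pvFusConsGoB pending ((a ++ s) :: t) rs

def pvFusConsB (syll : List (List Char)) : List (List Char) := pvFusConsGoB [] [] syll

-- fusionner_graphèmes: forward fold holding the current syllable cur
def pvFusGraGoB (racc : List (List Char)) (cur : List Char) (rest : List (List Char)) :
    List (List Char) :=
  match rest with
  | [] => (cur :: racc).reverse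
  | s :: rs =>
      if pvCoupeFrontB cur s then pvFusGraGoB racc (cur ++ s) rs
      else pvFusGraGoB (cur :: racc) s rs

def pvFusGraB (syll : List (List Char)) : List (List Char) :=
  match syll with
  | [] => []
  | x :: xs => pvFusGraGoB [] x xs

def nettoyer_decoupage_alt (mot : String) (decoupage : String) : String :=
  String.ofList (PySem.Chars.join "-".toList
    (List.filter (fun s => !(PySem.Chars.strip s).isEmpty)
      (pvFusGraB (pvFusConsB (PySem.Chars.splitOn decoupage.toList "-".toList)))))

-- ===== PRECONDITION & SPEC =====
def Spec_nettoyer_decoupage (mot : String) (decoupage : String) (out : String) : Prop := out = nettoyer_decoupage_alt mot decoupage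
instance (mot : String) (decoupage : String) (out : String) : Decidable (Spec_nettoyer_decoupage mot decoupage out) := by unfold Spec_nettoyer_decoupage; infer_instance

-- ===== CLAIM (what is proved, stated in full; the proofs are below) =====
def Claim_equal_nettoyer_decoupage : Prop := ∀ (mot : String) (decoupage : String), Dom_nettoyer_decoupage mot decoupage → Spec_nettoyer_decoupage mot decoupage (nettoyer_decoupage mot decoupage)

-- ===== LEMMAS AND PROOFS =====

-- proof-side recursive presentations of B's two folds (no accumulator)
def pvCP2 (a : List Char) : List (List Char) → List (List Char)
  | [] => [a]
  | s :: rs => if pvContientVoyelleB s then a :: pvCP2 s rs else pvCP2 (a ++ s) rs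

def pvCP1 (p : List Char) : List (List Char) → List (List Char)
  | [] => [p]
  | s :: rs => if pvContientVoyelleB s then pvCP2 (p ++ s) rs else pvCP1 (p ++ s) rs

def pvGG (cur : List Char) : List (List Char) → List (List Char)
  | [] => [cur]
  | s :: rs => if pvCoupeFrontB cur s then pvGG (cur ++ s) rs else cur :: pvGG s rs

theorem pvFusConsGoB_phase2 (rest : List (List Char)) :
    ∀ a t, pvFusConsGoB [] (a :: t) rest = t.reverse ++ pvCP2 a rest := by
  induction rest with
  | nil => intro a t; simp [pvFusConsGoB, pvCP2]
  | cons s rs ih =>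
      intro a t
      by_cases hv : pvContientVoyelleB s = true
      · simp [pvFusConsGoB, pvCP2, hv, ih]
      · simp [pvFusConsGoB, pvCP2, hv, ih]

theorem pvFusConsGoB_phase1 (rest : List (List Char)) :
    ∀ p, pvFusConsGoB p [] rest = pvCP1 p rest := by
  induction rest with
  | nil => intro p; simp [pvFusConsGoB, pvCP1]
  | cons s rs ih =>
      intro p
      by_cases hv : pvContientVoyelleB s = true
      · simp [pvFusConsGoB, pvCP1, hv, pvFusConsGoB_phase2]
      · simp [pvFusConsGoB, pvCP1, hv, ih]

theorem pvFusGraGoB_eq (rest : List (List Char)) :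
    ∀ racc cur, pvFusGraGoB racc cur rest = racc.reverse ++ pvGG cur rest := by
  induction rest with
  | nil => intro racc cur; simp [pvFusGraGoB, pvGG]
  | cons s rs ih =>
      intro racc cur
      by_cases hc : pvCoupeFrontB cur s = true
      · simp [pvFusGraGoB, pvGG, hc, ih]
      · simp [pvFusGraGoB, pvGG, hc, ih]

-- A's helpers coincide with B's (identical definitions)
theorem pvCV_AB : pvContientVoyelleA = pvContientVoyelleB := rfl
theorem pvMF_AB : pvMergeFoundA = pvCoupeFrontB := rfl

theorem pvCV_append (a b : List Char) :
    pvContientVoyelleB (a ++ b) = (pvContientVoyelleB a || pvContientVoyelleB b) := by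
  simp [pvContientVoyelleB, PySem.Chars.lower, List.any_append]

-- phase-2 characterisation of A's consonant loop: the first done.length+1 elements
-- are settled, the last of them (a) still absorbs vowel-less syllables
theorem pvCorrConsA_phase2 (rest : List (List Char)) :
    ∀ (done : List (List Char)) (a : List Char) (fuel : Nat), rest.length < fuel →
      pvCorrConsA (done ++ a :: rest) (done.length + 1) fuel = done ++ pvCP2 a rest := by
  induction rest with
  | nil =>
      intro done a fuel hf
      obtain ⟨f, rfl⟩ : ∃ f, fuel = f + 1 := ⟨fuel - 1, by omega⟩
      rw [pvCorrConsA]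
      simp [pvCP2]
  | cons s rs ih =>
      intro done a fuel hf
      obtain ⟨f, rfl⟩ : ∃ f, fuel = f + 1 := ⟨fuel - 1, by omega⟩
      have hfr : rs.length < f := by simp at hf; omega
      rw [pvCorrConsA]
      have hlen : done.length + 1 < (done ++ a :: s :: rs).length := by simp
      have hget : (done ++ a :: s :: rs)[done.length + 1]'hlen = s := by
        rw [List.getElem_append_right (by omega)]
        simp
      by_cases hv : pvContientVoyelleB s = true
      · simp only [hlen, hget, dif_pos, pvCV_AB, hv, Bool.not_true, Bool.false_eq_true,
          if_false]
        have hsplit : done ++ a :: s :: rs = (done ++ [a]) ++ s :: rs := by simp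
        rw [hsplit]
        have hl : done.length + 1 + 1 = (done ++ [a]).length + 1 := by simp
        rw [hl, ih _ _ _ hfr]
        simp [pvCP2, hv]
      · simp only [hlen, hget, dif_pos, pvCV_AB, hv, Bool.not_false, if_true,
          Nat.zero_lt_succ, Nat.add_sub_cancel]
        have hgetPrev : (done ++ a :: s :: rs)[done.length]'(by simp) = a := by
          rw [List.getElem_append_right (le_refl _)]
          simp
        simp only [hgetPrev]
        have hset : (done ++ a :: s :: rs).set done.length (a ++ s) =
            done ++ (a ++ s) :: s :: rs := by
          simp
        rw [hset]
        have herase : (done ++ (a ++ s) :: s :: rs).eraseIdx (done.length + 1) =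
            done ++ (a ++ s) :: rs := by
          rw [List.eraseIdx_append_of_length_le (by omega)]
          simp [List.eraseIdx]
        rw [herase, ih _ _ _ hfr]
        simp [pvCP2, hv]

-- phase-1: head element p is vowel-less and keeps absorbing until a vowel appears
theorem pvCorrConsA_phase1 (rest : List (List Char)) :
    ∀ p (fuel : Nat), rest.length + 1 < fuel → pvContientVoyelleB p = false →
      pvCorrConsA (p :: rest) 0 fuel = pvCP1 p rest := by
  induction rest with
  | nil =>
      intro p fuel hf hp
      obtain ⟨f, rfl⟩ : ∃ f, fuel = f + 1 := ⟨fuel - 1, by omega⟩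
      obtain ⟨f', rfl⟩ : ∃ f', f = f' + 1 := ⟨f - 1, by omega⟩
      rw [pvCorrConsA, pvCorrConsA]
      simp [pvCV_AB, hp, pvCP1]
  | cons s rs ih =>
      intro p fuel hf hp
      obtain ⟨f, rfl⟩ : ∃ f, fuel = f + 1 := ⟨fuel - 1, by omega⟩
      rw [pvCorrConsA]
      simp only [List.length_cons, Nat.zero_lt_succ, dif_pos, List.getElem_cons_zero,
        pvCV_AB, hp, Bool.not_false, if_true, lt_irrefl, dif_neg, not_false_iff,
        Nat.add_sub_cancel, List.getElem!_cons_succ, List.getElem!_cons_zero,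
        List.set_cons_succ, List.set_cons_zero, List.eraseIdx_cons_zero]
      by_cases hv : pvContientVoyelleB s = true
      · have hps : pvContientVoyelleB (p ++ s) = true := by
          rw [pvCV_append]
          simp [hv]
        obtain ⟨f', rfl⟩ : ∃ f', f = f' + 1 := ⟨f - 1, by simp at hf; omega⟩
        rw [pvCorrConsA]
        simp only [List.length_cons, Nat.zero_lt_succ, dif_pos, List.getElem_cons_zero,
          pvCV_AB, hps, Bool.not_true, Bool.false_eq_true, if_false]
        have h2 := pvCorrConsA_phase2 rs [] (p ++ s) f' (by simp at hf; omega)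
        simp only [List.nil_append, List.length_nil, Nat.zero_add] at h2
        rw [h2]
        simp [pvCP1, hv]
      · have hv' : pvContientVoyelleB s = false := by simpa using hv
        have hps : pvContientVoyelleB (p ++ s) = false := by
          rw [pvCV_append]
          simp [hp, hv']
        rw [ih (p ++ s) f (by simp at hf; omega) hps]
        simp [pvCP1, hv']

theorem pvCorrConsA_eq (s : List Char) (ss : List (List Char)) :
    ∀ fuel, ss.length + 2 < fuel →
      pvCorrConsA (s :: ss) 0 fuel = pvFusConsB (s :: ss) := by
  intro fuel hf
  by_cases hv : pvContientVoyelleB s = true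
  · obtain ⟨f, rfl⟩ : ∃ f, fuel = f + 1 := ⟨fuel - 1, by omega⟩
    rw [pvCorrConsA]
    simp only [List.length_cons, Nat.zero_lt_succ, dif_pos, List.getElem_cons_zero,
      pvCV_AB, hv, Bool.not_true, Bool.false_eq_true, if_false]
    have hA := pvCorrConsA_phase2 ss [] s f (by omega)
    simp only [List.nil_append, List.length_nil, Nat.zero_add] at hA
    rw [hA]
    simp [pvFusConsB, pvFusConsGoB, hv, pvFusConsGoB_phase2]
  · have hv' : pvContientVoyelleB s = false := by simpa using hv
    rw [pvCorrConsA_phase1 ss s fuel (by omega) hv']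
    simp [pvFusConsB, pvFusConsGoB, hv', pvFusConsGoB_phase1]

theorem pvCorrGraA_go (rest : List (List Char)) :
    ∀ (done : List (List Char)) (cur : List Char) (fuel : Nat), rest.length < fuel →
      pvCorrGraA (done ++ cur :: rest) done.length fuel = done ++ pvGG cur rest := by
  induction rest with
  | nil =>
      intro done cur fuel hf
      obtain ⟨f, rfl⟩ : ∃ f, fuel = f + 1 := ⟨fuel - 1, by omega⟩
      rw [pvCorrGraA]
      simp [pvGG]
  | cons s rs ih =>
      intro done cur fuel hf
      obtain ⟨f, rfl⟩ : ∃ f, fuel = f + 1 := ⟨fuel - 1, by omega⟩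
      have hfr : rs.length < f := by simp at hf; omega
      rw [pvCorrGraA]
      have hlen : done.length + 1 < (done ++ cur :: s :: rs).length := by simp
      have hget0 : (done ++ cur :: s :: rs)[done.length]'(by simp) = cur := by
        rw [List.getElem_append_right (le_refl _)]; simp
      have hget1 : (done ++ cur :: s :: rs)[done.length + 1]'hlen = s := by
        rw [List.getElem_append_right (by omega)]; simp
      simp only [hlen, dif_pos, hget0, hget1, pvMF_AB]
      by_cases hc : pvCoupeFrontB cur s = true
      · rw [if_pos hc]
        have hset : (done ++ cur :: s :: rs).set done.length (cur ++ s) =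
            done ++ (cur ++ s) :: s :: rs := by simp
        rw [hset]
        have herase : (done ++ (cur ++ s) :: s :: rs).eraseIdx (done.length + 1) =
            done ++ (cur ++ s) :: rs := by
          rw [List.eraseIdx_append_of_length_le (by omega)]
          simp [List.eraseIdx]
        rw [herase, ih _ _ _ hfr]
        simp [pvGG, hc]
      · rw [if_neg hc]
        have hsplit : done ++ cur :: s :: rs = (done ++ [cur]) ++ s :: rs := by simp
        rw [hsplit]
        have hl : done.length + 1 = (done ++ [cur]).length := by simp
        rw [hl, ih _ _ _ hfr]
        simp [pvGG, hc]

theorem pvCorrGraA_eq (syll : List (List Char)) :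
    ∀ fuel, syll.length < fuel + 1 → pvCorrGraA syll 0 fuel = pvFusGraB syll := by
  intro fuel hf
  cases syll with
  | nil =>
      cases fuel with
      | zero => rw [pvCorrGraA]; simp [pvFusGraB]
      | succ f => rw [pvCorrGraA]; simp [pvFusGraB]
  | cons x xs =>
      have h := pvCorrGraA_go xs [] x fuel (by simp at hf; omega)
      simpa [pvFusGraB, pvFusGraGoB_eq] using h

-- ===== VERDICT (by name: the statement is the Claim_ definition above) =====
theorem nettoyer_decoupage_spec : Claim_equal_nettoyer_decoupage := by
  intro mot decoupage _
  unfold Spec_nettoyer_decoupage nettoyer_decoupage nettoyer_decoupage_alt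
  unfold pvCorrConsA2 pvCorrGraA2
  cases hxs : PySem.Chars.splitOn decoupage.toList "-".toList with
  | nil =>
      simp [pvCorrConsA, pvCorrGraA, pvFusConsB, pvFusConsGoB, pvFusGraB, pvFusGraGoB,
        PySem.Chars.strip, PySem.Chars.lstrip, PySem.Chars.rstrip, PySem.Chars.join,
        List.filter]
  | cons s ss =>
      rw [pvCorrConsA_eq s ss _ (by simp; omega)]
      rw [pvCorrGraA_eq _ _ (by omega)]
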